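-- pv_equiv track=rewrite | github.com/2ayush2/OCR-Model | app.py | filter_ocr_text
-- ===== SOURCE A (Python) =====
-- def filter_ocr_text(ocr_text):
--     """Filters unwanted symbols & formats OCR output correctly"""
--     cleaned_text = []
--     seen_lines = set()
--
--     for line in ocr_text.split("\n"):
--         line = line.strip()
--
--         # Remove lines with only numbers (Unwanted detections)
--         if line.isdigit():
--             continue
--
--         if line and line not in seen_lines:  # Remove duplicates
--             seen_lines.add(line)
--             cleaned_text.append(line)
--
--     return "\n".join(cleaned_text)
-- ===== SOURCE B (Python) =====
-- def filter_ocr_text(ocr_text):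
--     """Filters unwanted symbols & formats OCR output correctly.
--
--     Builds the result back-to-front: walk the lines in reverse, and for each
--     kept line prepend it and delete its duplicates from the suffix built so
--     far.  No seen-set is needed: a line survives in the final list exactly at
--     its first occurrence, because every later copy is deleted when the earlier
--     one is prepended.
--     """
--     result = []
--     for raw in reversed(ocr_text.split("\n")):
--         line = raw.strip()
--         if line and not line.isdigit():
--             result = [line] + [l for l in result if l != line]
--     return "\n".join(result)
-- ===== Notes on version B (the rewrite author's own statement) =====
-- stated objective: alternative
-- what changed: Instead of a forward scan with a seen-set and a membership branch, B builds the output back-to-front: it walks the lines in reverse and, for each kept line, prepends it and deletes its duplicates from the suffix built so far, so no auxiliary seen structure exists.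
import Mathlib
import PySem

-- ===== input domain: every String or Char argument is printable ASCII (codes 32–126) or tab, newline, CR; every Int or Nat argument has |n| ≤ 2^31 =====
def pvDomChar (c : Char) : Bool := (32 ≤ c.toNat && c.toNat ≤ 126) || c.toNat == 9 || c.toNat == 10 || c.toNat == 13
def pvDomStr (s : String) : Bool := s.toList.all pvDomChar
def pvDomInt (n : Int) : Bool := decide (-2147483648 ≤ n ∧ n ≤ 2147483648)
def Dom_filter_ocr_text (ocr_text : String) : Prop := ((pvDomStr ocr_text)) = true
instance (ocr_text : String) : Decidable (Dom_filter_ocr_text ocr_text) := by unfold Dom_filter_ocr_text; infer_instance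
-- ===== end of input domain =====

-- B replaces A's forward scan with a seen-set by a backward pass that prepends each kept
-- line and deletes its duplicates from the suffix built so far; objective: alternative.

-- ===== PORT A =====
-- The loop body: strip the line, skip digit-only lines, append if truthy and unseen.
def pvStepA (st : List (List Char) × PySem.Set (List Char)) (line : List Char) :
    List (List Char) × PySem.Set (List Char) :=
  let line := PySem.Chars.strip line
  if PySem.Chars.strIsdigit line then st
  else if line ≠ [] ∧ line ∉ st.2 then (st.1 ++ [line], PySem.Set.add st.2 line)
  else st

-- Loop over the lines carrying (cleaned_text, seen_lines); branches in A's order.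
def filter_ocr_text (ocr_text : String) : String :=
  let st := (PySem.Chars.splitOn ocr_text.toList ['\n']).foldl pvStepA ([], PySem.Set.empty)
  String.ofList (PySem.Chars.join ['\n'] st.1)

-- ===== PORT B =====
-- The loop body for the backward pass: strip, and if kept, prepend the line and drop
-- its duplicates from the accumulated result ([line] + [l for l in result if l != line]).
def pvStepB (result : List (List Char)) (raw : List Char) : List (List Char) :=
  let line := PySem.Chars.strip raw
  if line ≠ [] ∧ ¬ PySem.Chars.strIsdigit line then
    line :: result.filter (fun l => l ≠ line)
  else result

-- 'for raw in reversed(lines)' = fold over the reversed line list.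
def filter_ocr_text_alt (ocr_text : String) : String :=
  let res := ((PySem.Chars.splitOn ocr_text.toList ['\n']).reverse).foldl pvStepB []
  String.ofList (PySem.Chars.join ['\n'] res)

-- ===== PRECONDITION & SPEC =====
def Spec_filter_ocr_text (ocr_text : String) (out : String) : Prop := out = filter_ocr_text_alt ocr_text
instance (ocr_text : String) (out : String) : Decidable (Spec_filter_ocr_text ocr_text out) := by unfold Spec_filter_ocr_text; infer_instance

-- ===== CLAIM (what is proved, stated in full; the proofs are below) =====
def Claim_equal_filter_ocr_text : Prop := ∀ (ocr_text : String), Dom_filter_ocr_text ocr_text → Spec_filter_ocr_text ocr_text (filter_ocr_text ocr_text)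

-- ===== LEMMAS AND PROOFS =====

-- A's loop, started with cleaned_text equal to the seen set s, produces s followed by
-- B's backward result restricted to lines not already in s (both components equal).
theorem filter_ocr_text_loop_inv (ls : List (List Char)) (s : PySem.Set (List Char)) :
    ls.foldl pvStepA (s, s)
    = (let t := s ++ (ls.foldr (fun raw res => pvStepB res raw) []).filter
          (fun x => decide (x ∉ s))
       (t, t)) := by
  induction ls generalizing s with
  | nil => simp
  | cons l ls ih =>
    simp only [List.foldl_cons, List.foldr_cons]
    by_cases hd : PySem.Chars.strIsdigit (PySem.Chars.strip l)
    · have h1 : pvStepA (s, s) l = (s, s) := by simp [pvStepA, hd]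
      have h2 : pvStepB (List.foldr (fun raw res => pvStepB res raw) [] ls) l
          = List.foldr (fun raw res => pvStepB res raw) [] ls := by
        simp [pvStepB, hd]
      rw [h1, h2, ih]
    · by_cases he : PySem.Chars.strip l = []
      · have h1 : pvStepA (s, s) l = (s, s) := by simp [pvStepA, he]
        have h2 : pvStepB (List.foldr (fun raw res => pvStepB res raw) [] ls) l
            = List.foldr (fun raw res => pvStepB res raw) [] ls := by
          simp [pvStepB, he]
        rw [h1, h2, ih]
      · have h2 : pvStepB (List.foldr (fun raw res => pvStepB res raw) [] ls) l
            = PySem.Chars.strip l ::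
              (List.foldr (fun raw res => pvStepB res raw) [] ls).filter
                (fun x => !decide (x = PySem.Chars.strip l)) := by
          simp [pvStepB, he, hd]
        by_cases hm : PySem.Chars.strip l ∈ s
        · -- line already seen: A skips; B's prepended copy is dropped by the ∉-s filter,
          -- and the inner duplicate-removal is absorbed (x ∉ s already forces x ≠ line).
          have h1 : pvStepA (s, s) l = (s, s) := by simp [pvStepA, hd, hm]
          rw [h1, h2, ih]
          simp only [decide_not]
          have key : List.filter (fun x => !decide (x ∈ s))
                (PySem.Chars.strip l ::
                  List.filter (fun x => !decide (x = PySem.Chars.strip l))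
                    (List.foldr (fun raw res => pvStepB res raw) [] ls))
              = List.filter (fun x => !decide (x ∈ s))
                  (List.foldr (fun raw res => pvStepB res raw) [] ls) := by
            rw [List.filter_cons_of_neg (by simp [hm]), List.filter_filter]
            apply List.filter_congr
            intro x _
            by_cases hx : x ∈ s
            · simp [hx]
            · have hxa : x ≠ PySem.Chars.strip l := fun h => hx (h ▸ hm)
              simp [hx, hxa]
          rw [key]
        · -- new line: A appends it to text and set; B's head survives, and the two
          -- filters compose into the single ∉-(s ++ [line]) filter of the IH.
          have h1 : pvStepA (s, s) l
              = (s ++ [PySem.Chars.strip l], s ++ [PySem.Chars.strip l]) := by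
            simp [pvStepA, hd, he, hm]
          rw [h1, h2, ih (s ++ [PySem.Chars.strip l])]
          simp only [decide_not]
          have key : List.filter (fun x => !decide (x ∈ s))
                (PySem.Chars.strip l ::
                  List.filter (fun x => !decide (x = PySem.Chars.strip l))
                    (List.foldr (fun raw res => pvStepB res raw) [] ls))
              = PySem.Chars.strip l ::
                  List.filter (fun x => !decide (x ∈ s ++ [PySem.Chars.strip l]))
                    (List.foldr (fun raw res => pvStepB res raw) [] ls) := by
            rw [List.filter_cons_of_pos (by simp [hm]), List.filter_filter]
            congr 1
            apply List.filter_congr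
            intro x _
            by_cases hx1 : x = PySem.Chars.strip l <;> by_cases hx2 : x ∈ s <;>
              simp [hx1, hx2]
          rw [key]
          simp

-- ===== VERDICT (by name: the statement is the Claim_ definition above) =====
theorem filter_ocr_text_spec : Claim_equal_filter_ocr_text := by
  intro ocr_text _
  unfold Spec_filter_ocr_text filter_ocr_text filter_ocr_text_alt
  rw [show (([], PySem.Set.empty) : List (List Char) × PySem.Set (List Char))
        = ((PySem.Set.empty : PySem.Set (List Char)), (PySem.Set.empty : PySem.Set (List Char))) from rfl,
      filter_ocr_text_loop_inv, List.foldl_reverse]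
  simp [PySem.Set.empty]
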